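-- pv_equiv track=rewrite | github.com/ArmandAgopian/advent-of-code | 2023/04/solution.py | part2
-- ===== SOURCE A (Python) =====
-- def part2(lines):
--     cards = [1] * len(lines)
--
--     for i, line in enumerate(lines):
--         winning_nums = set(line.split(":")[1].split("|")[0].split())
--         nums = set(line.split(":")[1].split("|")[1].split())
--         actual_wins = winning_nums & nums
--
--         for j in range(len(actual_wins)):
--             cards[i + j + 1] += cards[i]
--
--     return sum(cards)
-- ===== SOURCE B (Python) =====
-- def _wins(line):
--     winning_nums = set(line.split(":")[1].split("|")[0].split())
--     nums = set(line.split(":")[1].split("|")[1].split())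
--     return len(winning_nums & nums)
--
--
-- def part2(lines):
--     wins = [_wins(line) for line in lines]
--     n = len(lines)
--     total = [0] * n
--     for i in range(n - 1, -1, -1):
--         t = 1
--         for k in range(1, wins[i] + 1):
--             t += total[i + k]
--         total[i] = t
--     return sum(total)
-- ===== Notes on version B (the rewrite author's own statement) =====
-- stated objective: alternative
-- what changed: Replaces A's forward range-add accumulation (each card pushes its copy count onto later cards) with a backward dynamic-programming recurrence total[i] = 1 + sum(total[i+1..i+wins_i]) computed right-to-left, summing per-card totals instead of copy counts.
import Mathlib
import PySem

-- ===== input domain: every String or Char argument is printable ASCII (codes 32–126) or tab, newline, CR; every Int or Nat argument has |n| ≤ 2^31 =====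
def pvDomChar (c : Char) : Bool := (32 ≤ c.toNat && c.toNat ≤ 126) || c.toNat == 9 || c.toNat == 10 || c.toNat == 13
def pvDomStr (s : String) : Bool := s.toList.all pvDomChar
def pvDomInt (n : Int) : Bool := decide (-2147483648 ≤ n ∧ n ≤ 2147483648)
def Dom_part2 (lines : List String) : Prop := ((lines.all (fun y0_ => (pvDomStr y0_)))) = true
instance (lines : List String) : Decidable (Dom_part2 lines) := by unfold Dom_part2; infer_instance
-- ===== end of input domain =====

-- B replaces A's forward range-add accumulation with a backward DP recurrence
-- total[i] = 1 + sum(total[i+1..i+wins_i]); same cost, different decomposition (return value only; neither mutates its argument).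

-- shared parsing helper (the parsing code is textually identical in A and B):
-- len(set(line.split(":")[1].split("|")[0].split()) & set(line.split(":")[1].split("|")[1].split()))
def lineWins (line : String) : Int :=
  let parts := (PySem.Str.split? line ":").getD []
  let halves := (PySem.Str.split? (PySem.List.pyGetD parts 1 "") "|").getD []
  let winning := PySem.Set.ofList (PySem.Str.split₀ (PySem.List.pyGetD halves 0 ""))
  let nums := PySem.Set.ofList (PySem.Str.split₀ (PySem.List.pyGetD halves 1 ""))
  PySem.Set.len (PySem.Set.inter winning nums)

-- ===== PORT A =====
def part2 (lines : List String) : Int :=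
  let cards : List Int := List.replicate lines.length 1
  let cards := (PySem.List.enumerate lines).foldl (fun cards p =>
    let i := p.1
    let w := lineWins p.2
    (PySem.List.pyRange 0 w).foldl (fun cs j =>
      PySem.List.pySetD cs (i + j + 1)
        (PySem.List.pyGetD cs (i + j + 1) 0 + PySem.List.pyGetD cs i 0)) cards) cards
  cards.sum

-- ===== PORT B =====
def part2_alt (lines : List String) : Int :=
  let wins := lines.map lineWins
  let n : Int := PySem.List.len lines
  let total : List Int := List.replicate lines.length 0
  let total := (PySem.List.pyRange (n - 1) (-1) (-1)).foldl (fun total i =>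
    let t := (PySem.List.pyRange 1 (PySem.List.pyGetD wins i 0 + 1)).foldl
      (fun t k => t + PySem.List.pyGetD total (i + k) 0) 1
    PySem.List.pySetD total i t) total
  total.sum

-- ===== PRECONDITION & SPEC =====
-- Pre_ excludes exactly the inputs on which A raises: a line with no ":" or no "|" after the
-- colon (IndexError on split(...)[1]), and a card whose win count reaches past the last card
-- (IndexError on cards[i+j+1]).
def Pre_part2 (lines : List String) : Prop :=
  (∀ line ∈ lines,
      2 ≤ ((PySem.Str.split? line ":").getD []).length ∧
      2 ≤ ((PySem.Str.split? (PySem.List.pyGetD ((PySem.Str.split? line ":").getD []) 1 "") "|").getD []).length) ∧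
  (∀ i : Nat, i < lines.length →
      (i : Int) + lineWins (lines.getD i "") + 1 ≤ (lines.length : Int))
instance (lines : List String) : Decidable (Pre_part2 lines) := by unfold Pre_part2; infer_instance

def pvWitness_part2 : List String :=
  ["Card 1: 1 2 | 2 3", "Card 2: 5 | 5", "Card 3: 1 | 2"]

def Spec_part2 (lines : List String) (out : Int) : Prop := out = part2_alt lines
instance (lines : List String) (out : Int) : Decidable (Spec_part2 lines out) := by unfold Spec_part2; infer_instance

-- ===== CLAIM (what is proved, stated in full; the proofs are below) =====
def Claim_equal_part2 : Prop := ∀ (lines : List String), Dom_part2 lines → Pre_part2 lines → Spec_part2 lines (part2 lines)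

-- ===== LEMMAS AND PROOFS =====

-- win counts as a list of naturals (lineWins is a set length, hence nonnegative)
def wNat (lines : List String) : List Nat := lines.map (fun l => (lineWins l).toNat)

lemma lineWins_nonneg (line : String) : 0 ≤ lineWins line := by
  simp only [lineWins, PySem.Set.len]
  exact Int.natCast_nonneg _

-- total scratchcards produced (transitively, counting itself) by one copy of card i
def tval (w : List Nat) : Nat → Int
  | i =>
    if h : i < w.length then
      1 + ∑ j ∈ (Finset.range (w.getD i 0)).attach, tval w (i + j.1 + 1)
    else 0
termination_by i => w.length - i
decreasing_by omega

lemma tval_eq (w : List Nat) (i : Nat) (h : i < w.length) :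
    tval w i = 1 + ∑ j ∈ Finset.range (w.getD i 0), tval w (i + j + 1) := by
  rw [tval, dif_pos h, Finset.sum_attach (Finset.range (w.getD i 0)) (fun j => tval w (i + j + 1))]

lemma sum_range_list (f : Nat → Int) (r : Nat) :
    ((List.range r).map f).sum = ∑ j ∈ Finset.range r, f j := by
  induction r with
  | zero => simp
  | succ r ih => rw [List.range_succ, Finset.sum_range_succ]; simp [ih]

lemma sum_eq_sum_getD (l : List Int) :
    l.sum = ∑ i ∈ Finset.range l.length, l.getD i 0 := by
  induction l with
  | nil => simp
  | cons a t ih =>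
    rw [List.sum_cons, List.length_cons, Finset.sum_range_succ']
    simp [ih, List.getD_eq_getElem?_getD]
    omega

lemma getD_set_int (l : List Int) (n : Nat) (v : Int) (k : Nat) :
    (l.set n v).getD k 0 = if k = n ∧ n < l.length then v else l.getD k 0 := by
  simp [List.getD_eq_getElem?_getD, List.getElem?_set]
  split_ifs <;> simp_all

-- the abstract step functions of the two ports
def Astep (w : List Nat) (cs : List Int) (i : Nat) : List Int :=
  (List.range (w.getD i 0)).foldl
    (fun cs j => cs.set (i + j + 1) (cs.getD (i + j + 1) 0 + cs.getD i 0)) cs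

def Bstep (w : List Nat) (total : List Int) (i : Nat) : List Int :=
  total.set i (1 + ((List.range (w.getD i 0)).map (fun k => total.getD (i + 1 + k) 0)).sum)

lemma foldA_length (i : Nat) (l : List Nat) :
    ∀ cs : List Int,
      (l.foldl (fun cs j => cs.set (i + j + 1) (cs.getD (i + j + 1) 0 + cs.getD i 0)) cs).length
        = cs.length := by
  induction l with
  | nil => intro cs; rfl
  | cons j t ih => intro cs; rw [List.foldl_cons, ih, List.length_set]

lemma Astep_length (w : List Nat) (cs : List Int) (i : Nat) :
    (Astep w cs i).length = cs.length := foldA_length i _ cs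

lemma Astep_getD (_w : List Nat) (i : Nat) :
    ∀ (r : Nat) (cs : List Int), i + r < cs.length →
    ∀ k, ((List.range r).foldl
        (fun cs j => cs.set (i + j + 1) (cs.getD (i + j + 1) 0 + cs.getD i 0)) cs).getD k 0
      = cs.getD k 0 + (if i + 1 ≤ k ∧ k < i + r + 1 then cs.getD i 0 else 0) := by
  intro r
  induction r with
  | zero =>
    intro cs _ k
    have h0 : ¬(i + 1 ≤ k ∧ k < i + 0 + 1) := by omega
    rw [if_neg h0]
    simp
  | succ r ih =>
    intro cs hlen k
    have hr : i + r < cs.length := by omega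
    have hlen' :
        (((List.range r).foldl
          (fun cs j => cs.set (i + j + 1) (cs.getD (i + j + 1) 0 + cs.getD i 0)) cs)).length
          = cs.length := foldA_length i _ cs
    rw [List.range_succ, List.foldl_append, List.foldl_cons, List.foldl_nil]
    rw [getD_set_int, ih cs hr, ih cs hr, ih cs hr]
    have c1 : ¬(i + 1 ≤ i + r + 1 ∧ i + r + 1 < i + r + 1) := by omega
    have c2 : ¬(i + 1 ≤ i ∧ i < i + r + 1) := by omega
    rw [if_neg c1, if_neg c2, hlen']
    by_cases hk : k = i + r + 1
    · subst hk
      have t1 : i + r + 1 = i + r + 1 ∧ i + r + 1 < cs.length := by omega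
      have t2 : i + 1 ≤ i + r + 1 ∧ i + r + 1 < i + (r + 1) + 1 := by omega
      rw [if_pos t1, if_pos t2]
      ring
    · have t1 : ¬(k = i + r + 1 ∧ i + r + 1 < cs.length) := by omega
      have t2 : (i + 1 ≤ k ∧ k < i + r + 1) ↔ (i + 1 ≤ k ∧ k < i + (r + 1) + 1) := by omega
      rw [if_neg t1]
      simp only [t2]

lemma A_fold (w : List Nat) (hb : ∀ i, i < w.length → i + w.getD i 0 < w.length) :
    ∀ (k m : Nat) (cs : List Int), cs.length = w.length → m + k = w.length →
    ((List.range' m k).foldl (Astep w) cs).sum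
      = ∑ i ∈ Finset.range w.length,
          (if i < m then cs.getD i 0 else cs.getD i 0 * tval w i) := by
  intro k
  induction k with
  | zero =>
    intro m cs hlen hm
    rw [show m = w.length by omega] at *
    simp only [List.range'_zero, List.foldl_nil]
    rw [sum_eq_sum_getD, hlen]
    exact Finset.sum_congr rfl fun i hi => (if_pos (Finset.mem_range.mp hi)).symm
  | succ k ih =>
    intro m cs hlen hm
    have hmn : m < w.length := by omega
    have hbm : m + w.getD m 0 < w.length := hb m hmn
    rw [List.range'_succ, List.foldl_cons, ih (m + 1) (Astep w cs m) (by rw [Astep_length, hlen]) (by omega)]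
    have hcs' : ∀ k', (Astep w cs m).getD k' 0
        = cs.getD k' 0 + (if m + 1 ≤ k' ∧ k' < m + w.getD m 0 + 1 then cs.getD m 0 else 0) :=
      Astep_getD w m (w.getD m 0) cs (by omega)
    have key : ∀ i ∈ Finset.range w.length,
        (if i < m + 1 then (Astep w cs m).getD i 0 else (Astep w cs m).getD i 0 * tval w i)
          = (if i < m then cs.getD i 0 else cs.getD i 0 * tval w i)
            + ((if m + 1 ≤ i ∧ i < m + w.getD m 0 + 1 then cs.getD m 0 * tval w i else 0)
            + (if i = m then cs.getD m 0 * (1 - tval w m) else 0)) := by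
      intro i _
      rw [hcs' i]
      by_cases h1 : i < m
      · have : i < m + 1 := by omega
        rw [if_pos this, if_pos h1, if_neg (by omega : ¬(m + 1 ≤ i ∧ i < m + w.getD m 0 + 1)),
          if_neg (by omega : ¬(m + 1 ≤ i ∧ i < m + w.getD m 0 + 1)),
          if_neg (by omega : ¬i = m)]
        ring
      · by_cases h2 : i = m
        · subst h2
          rw [if_pos (by omega : i < i + 1), if_neg (by omega : ¬i < i),
            if_neg (by omega : ¬(i + 1 ≤ i ∧ i < i + w.getD i 0 + 1)),
            if_neg (by omega : ¬(i + 1 ≤ i ∧ i < i + w.getD i 0 + 1)),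
            if_pos rfl]
          ring
        · rw [if_neg (by omega : ¬i < m + 1), if_neg (by omega : ¬i < m), if_neg (by omega : ¬i = m)]
          by_cases h3 : m + 1 ≤ i ∧ i < m + w.getD m 0 + 1
          · rw [if_pos h3, if_pos h3]; ring
          · rw [if_neg h3, if_neg h3]; ring
    rw [Finset.sum_congr rfl key, Finset.sum_add_distrib, Finset.sum_add_distrib,
      Finset.sum_ite_eq' (Finset.range w.length) m
        (fun i => cs.getD m 0 * (1 - tval w m)),
      if_pos (Finset.mem_range.mpr hmn)]

    have hfilter : Finset.filter (fun i => m + 1 ≤ i ∧ i < m + w.getD m 0 + 1)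
        (Finset.range w.length) = Finset.Ico (m + 1) (m + w.getD m 0 + 1) := by
      ext x
      simp only [Finset.mem_filter, Finset.mem_range, Finset.mem_Ico]
      omega
    have hsum2 : (∑ i ∈ Finset.range w.length,
        if m + 1 ≤ i ∧ i < m + w.getD m 0 + 1 then cs.getD m 0 * tval w i else 0)
        = cs.getD m 0 * ∑ j ∈ Finset.range (w.getD m 0), tval w (m + j + 1) := by
      rw [← Finset.sum_filter, hfilter, Finset.sum_Ico_eq_sum_range,
        show m + w.getD m 0 + 1 - (m + 1) = w.getD m 0 by omega, Finset.mul_sum]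
      exact Finset.sum_congr rfl fun j _ => by rw [show m + 1 + j = m + j + 1 by omega]
    rw [hsum2, tval_eq w m hmn]
    ring

lemma B_fold (w : List Nat) (hb : ∀ i, i < w.length → i + w.getD i 0 < w.length) :
    ∀ (m : Nat) (total : List Int), m ≤ w.length → total.length = w.length →
    (∀ i, m ≤ i → i < w.length → total.getD i 0 = tval w i) →
    ∀ k, k < w.length →
      (((List.range m).reverse).foldl (Bstep w) total).getD k 0 = tval w k := by
  intro m
  induction m with
  | zero =>
    intro total _ _ hinv k hk
    simp only [List.range_zero, List.reverse_nil, List.foldl_nil]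
    exact hinv k (Nat.zero_le k) hk
  | succ m ih =>
    intro total hm hlen hinv k hk
    have hmn : m < w.length := by omega
    have hbm : m + w.getD m 0 < w.length := hb m hmn
    rw [List.range_succ, List.reverse_append, List.reverse_singleton, List.singleton_append,
      List.foldl_cons]
    apply ih (Bstep w total m) (by omega) (by rw [Bstep, List.length_set, hlen]) _ k hk
    intro i hi hi'
    rw [Bstep, getD_set_int]
    by_cases h2 : i = m
    · subst h2
      rw [if_pos ⟨rfl, by omega⟩]
      have hmap : (List.range (w.getD i 0)).map (fun k => total.getD (i + 1 + k) 0)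
          = (List.range (w.getD i 0)).map (fun k => tval w (i + 1 + k)) := by
        apply List.map_congr_left
        intro x hx
        have hx' : x < w.getD i 0 := List.mem_range.mp hx
        exact hinv (i + 1 + x) (by omega) (by omega)
      rw [hmap, sum_range_list, tval_eq w i hi']
      congr 1
      exact Finset.sum_congr rfl fun j _ => by rw [show i + 1 + j = i + j + 1 by omega]
    · rw [if_neg (by omega : ¬(i = m ∧ m < total.length))]
      exact hinv i (by omega) hi'

lemma Bfold_length (w : List Nat) (l : List Nat) (total : List Int) :
    (l.foldl (Bstep w) total).length = total.length := by
  induction l generalizing total with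
  | nil => rfl
  | cons j t ih => simp [List.foldl_cons, ih, Bstep]

-- port A reduces to the abstract forward fold
lemma part2_eq_abstract (lines : List String) :
    part2 lines = ((List.range' 0 lines.length).foldl (Astep (wNat lines))
        (List.replicate lines.length 1)).sum := by
  simp only [part2]
  rw [PySem.List.enumerate_eq_map_pyRange lines "", PySem.List.len_eq,
    PySem.List.pyRange_zero_nat, List.foldl_map, List.foldl_map, List.range_eq_range']
  refine congrArg List.sum ?_
  apply PySem.List.foldl_congr_mem
  intro cs k hk
  have hk' : k < lines.length := by
    have := List.mem_range'_1.mp hk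
    omega
  have hget : PySem.List.pyGetD lines (k : Int) "" = lines.getD k "" :=
    PySem.List.pyGetD_natCast lines k ""
  have hsome : lines[k]? = some lines[k] := List.getElem?_eq_getElem hk'
  have hL : lines.getD k "" = lines[k] := by
    simp only [List.getD_eq_getElem?_getD, hsome, Option.getD_some]
  have hw : lineWins (lines.getD k "") = (((wNat lines).getD k 0 : Nat) : Int) := by
    have h2 : (wNat lines).getD k 0 = (lineWins lines[k]).toNat := by
      simp only [wNat, List.getD_eq_getElem?_getD, List.getElem?_map, hsome,
        Option.map_some, Option.getD_some]
    rw [hL, h2, Int.toNat_of_nonneg (lineWins_nonneg _)]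
  simp only [hget, hw, PySem.List.pyRange_zero_nat, List.foldl_map]
  show _ = Astep (wNat lines) cs k
  unfold Astep
  apply PySem.List.foldl_congr_mem
  intro cs' j _
  have hc : ((k : Int) + (j : Int) + 1) = (((k + j + 1 : Nat)) : Int) := by push_cast; ring
  rw [hc, PySem.List.pySetD_natCast, PySem.List.pyGetD_natCast, PySem.List.pyGetD_natCast]

-- port B reduces to the abstract backward fold
lemma part2_alt_eq_abstract (lines : List String) :
    part2_alt lines = (((List.range lines.length).reverse).foldl (Bstep (wNat lines))
        (List.replicate lines.length 0)).sum := by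
  simp only [part2_alt]
  rw [PySem.List.len_eq, PySem.List.pyRange_neg_one_eq_reverse,
    show (-1 : Int) + 1 = 0 from rfl,
    show ((lines.length : Int) - 1 + 1) = (lines.length : Int) by ring,
    PySem.List.pyRange_zero_nat, ← List.map_reverse, List.foldl_map]
  refine congrArg List.sum ?_
  apply PySem.List.foldl_congr_mem
  intro total i hi
  have hi' : i < lines.length := List.mem_range.mp (List.mem_reverse.mp hi)
  have hsome : lines[i]? = some lines[i] := List.getElem?_eq_getElem hi'
  have hwin : PySem.List.pyGetD (lines.map lineWins) (i : Int) 0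
      = (((wNat lines).getD i 0 : Nat) : Int) := by
    rw [PySem.List.pyGetD_natCast]
    have h1 : (lines.map lineWins).getD i 0 = lineWins lines[i] := by
      simp only [List.getD_eq_getElem?_getD, List.getElem?_map, hsome,
        Option.map_some, Option.getD_some]
    have h2 : (wNat lines).getD i 0 = (lineWins lines[i]).toNat := by
      simp only [wNat, List.getD_eq_getElem?_getD, List.getElem?_map, hsome,
        Option.map_some, Option.getD_some]
    rw [h1, h2, Int.toNat_of_nonneg (lineWins_nonneg _)]
  rw [hwin, PySem.List.pyRange_one, show (((((wNat lines).getD i 0 : Nat)) : Int) + 1 - 1).toNat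
      = (wNat lines).getD i 0 by omega, List.foldl_map]
  have hbody : ∀ (t : Int) (k : Nat), k ∈ List.range ((wNat lines).getD i 0) →
      t + PySem.List.pyGetD total ((i : Int) + (1 + (k : Int))) 0
        = t + total.getD (i + 1 + k) 0 := by
    intro t k _
    rw [show ((i : Int) + (1 + (k : Int))) = (((i + 1 + k : Nat)) : Int) by push_cast; ring,
      PySem.List.pyGetD_natCast]
  rw [PySem.List.foldl_congr_mem _ _ _ _ (fun t k hk => hbody t k hk),
    PySem.List.foldl_add, PySem.List.pySetD_natCast]
  rfl

-- ===== VERDICT (by name: the statement is the Claim_ definition above) =====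
theorem part2_spec : Claim_equal_part2 := by
  intro lines _ hpre
  unfold Spec_part2
  have hwlen : (wNat lines).length = lines.length := by
    simp [wNat]
  have hb : ∀ i, i < (wNat lines).length → i + (wNat lines).getD i 0 < (wNat lines).length := by
    intro i hi
    have hi' : i < lines.length := by omega
    have h := hpre.2 i hi'
    have hsome : lines[i]? = some lines[i] := List.getElem?_eq_getElem hi'
    have hL : lines.getD i "" = lines[i] := by
      simp only [List.getD_eq_getElem?_getD, hsome, Option.getD_some]
    have h2 : (wNat lines).getD i 0 = (lineWins lines[i]).toNat := by
      simp only [wNat, List.getD_eq_getElem?_getD, List.getElem?_map, hsome,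
        Option.map_some, Option.getD_some]
    rw [hL] at h
    rw [hwlen, h2]
    omega
  rw [part2_eq_abstract, part2_alt_eq_abstract]
  have hA := A_fold (wNat lines) hb lines.length 0 (List.replicate lines.length 1)
    (by rw [List.length_replicate, hwlen]) (by omega)
  rw [hA]
  have hBlen : ((List.range lines.length).reverse.foldl (Bstep (wNat lines))
      (List.replicate lines.length 0)).length = lines.length := by
    rw [Bfold_length, List.length_replicate]
  have hB := B_fold (wNat lines) hb lines.length (List.replicate lines.length 0)
    (le_of_eq hwlen.symm) (by rw [List.length_replicate, hwlen])
    (fun i h1 h2 => absurd (by omega : i < lines.length) (by omega))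
  rw [sum_eq_sum_getD, hBlen, hwlen]
  apply Finset.sum_congr rfl
  intro i hi
  have hi' : i < lines.length := Finset.mem_range.mp hi
  have hrep : (List.replicate lines.length (1 : Int)).getD i 0 = 1 := by
    simp [List.getD_eq_getElem?_getD, hi']
  rw [if_neg (by omega : ¬i < 0), hrep, one_mul, hB i (by omega)]
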